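-- pv_equiv track=rewrite | github.com/Tinada36/PL-Tkeshelashvili | PR7/10.py | poisk
-- ===== SOURCE A (Python) =====
-- def poisk(N):
--     schet = 0
--     b = []
--     arr = [i for i in range(0, 10)]
--     for i in arr:
--         for k in arr:
--             for s in arr:
--                 if s!=k and k!=i and s!= i:
--                     z = s*100 + k * 10 + i
--                     if z >= 100 and z < N:
--                         schet += 1
--     return schet
-- ===== SOURCE B (Python) =====
-- def poisk(N):
--     schet = 0
--     for z in range(100, 1000):
--         a = z // 100
--         b = (z // 10) % 10
--         c = z % 10
--         if z < N and a != b and b != c and a != c: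
--             schet += 1
--     return schet
-- ===== Notes on version B (the rewrite author's own statement) =====
-- stated objective: simpler
-- what changed: Replaces A's triple nested loop over digit triples (i,k,s) by a single pass over the candidate numbers 100..999, testing z < N and pairwise-distinct decimal digits extracted with //,%.
import Mathlib
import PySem

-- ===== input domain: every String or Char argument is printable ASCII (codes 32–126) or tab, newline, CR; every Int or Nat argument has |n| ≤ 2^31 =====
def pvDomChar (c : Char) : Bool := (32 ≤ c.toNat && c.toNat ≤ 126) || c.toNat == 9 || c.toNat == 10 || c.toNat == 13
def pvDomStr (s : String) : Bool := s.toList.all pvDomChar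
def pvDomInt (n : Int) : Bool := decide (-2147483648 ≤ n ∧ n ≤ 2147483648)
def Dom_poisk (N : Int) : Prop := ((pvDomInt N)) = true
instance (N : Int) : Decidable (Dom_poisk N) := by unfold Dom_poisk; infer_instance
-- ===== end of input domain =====

-- B replaces A's triple loop over digit permutations by a single pass over the numbers
-- 100..999 with a per-number distinct-digit test (objective: simpler).

-- ===== PORT A =====
def poisk (N : Int) : Int :=
  let arr := PySem.List.pyRange 0 10 1
  arr.foldl (fun schet i =>
    arr.foldl (fun schet k =>
      arr.foldl (fun schet s =>
        if s ≠ k ∧ k ≠ i ∧ s ≠ i then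
          let z := s * 100 + k * 10 + i
          if z ≥ 100 ∧ z < N then schet + 1 else schet
        else schet) schet) schet) 0

-- ===== PORT B =====
def poisk_alt (N : Int) : Int :=
  (PySem.List.pyRange 100 1000 1).foldl (fun schet z =>
    let a := PySem.Int.floordiv z 100
    let b := PySem.Int.mod (PySem.Int.floordiv z 10) 10
    let c := PySem.Int.mod z 10
    if z < N ∧ a ≠ b ∧ b ≠ c ∧ a ≠ c then schet + 1 else schet) 0

-- ===== PRECONDITION & SPEC =====
def Spec_poisk (N : Int) (out : Int) : Prop := out = poisk_alt N
instance (N : Int) (out : Int) : Decidable (Spec_poisk N out) := by unfold Spec_poisk; infer_instance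

-- ===== CLAIM (what is proved, stated in full; the proofs are below) =====
def Claim_equal_poisk : Prop := ∀ (N : Int), Dom_poisk N → Spec_poisk N (poisk N)

-- ===== LEMMAS AND PROOFS =====

-- a fold that on each step adds a function of the element is the sum of that function
theorem foldl_shift {α : Type} (g : α → Int) (f : Int → α → Int)
    (h : ∀ a x, f a x = a + g x) : ∀ (L : List α) (acc : Int),
    L.foldl f acc = acc + (L.map g).sum := by
  intro L
  induction L with
  | nil => intro acc; simp
  | cons x xs ih => intro acc; simp only [List.foldl, List.map, List.sum_cons, h, ih]; ring

-- per-element contribution of A's innermost loop body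
def gA (N i k s : Int) : Int :=
  if s ≠ k ∧ k ≠ i ∧ s ≠ i then
    (if s * 100 + k * 10 + i ≥ 100 ∧ s * 100 + k * 10 + i < N then (1:Int) else 0)
  else 0

-- per-element contribution of B's loop body
def gB (N z : Int) : Int :=
  if z < N ∧ PySem.Int.floordiv z 100 ≠ PySem.Int.mod (PySem.Int.floordiv z 10) 10 ∧
    PySem.Int.mod (PySem.Int.floordiv z 10) 10 ≠ PySem.Int.mod z 10 ∧
    PySem.Int.floordiv z 100 ≠ PySem.Int.mod z 10 then (1:Int) else 0

def indLt (N z : Int) : Int := if z < N then 1 else 0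

-- the N-independent list of candidate numbers produced by A's loop, in A's order
def LA : List Int :=
  (PySem.List.pyRange 0 10 1).flatMap (fun i =>
    (PySem.List.pyRange 0 10 1).flatMap (fun k =>
      ((PySem.List.pyRange 0 10 1).filter
          (fun s => decide ((s ≠ k ∧ k ≠ i ∧ s ≠ i) ∧ s * 100 + k * 10 + i ≥ 100))).map
        (fun s => s * 100 + k * 10 + i)))

-- the N-independent list of candidate numbers produced by B's loop (increasing order)
def LB : List Int :=
  (PySem.List.pyRange 100 1000 1).filter
    (fun z => decide (PySem.Int.floordiv z 100 ≠ PySem.Int.mod (PySem.Int.floordiv z 10) 10 ∧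
      PySem.Int.mod (PySem.Int.floordiv z 10) 10 ≠ PySem.Int.mod z 10 ∧
      PySem.Int.floordiv z 100 ≠ PySem.Int.mod z 10))

theorem sum_map_ite_filter {α : Type} (q : α → Prop) [DecidablePred q] (f : α → Int) :
    ∀ (L : List α),
    (L.map (fun x => if q x then f x else 0)).sum = ((L.filter (fun x => decide (q x))).map f).sum := by
  intro L
  induction L with
  | nil => simp
  | cons x xs ih =>
    by_cases hx : q x <;> simp [hx, ih]

theorem sum_map_flatMap {α β : Type} (M : α → List β) (f : β → Int) :
    ∀ (L : List α),
    ((L.flatMap M).map f).sum = (L.map (fun x => ((M x).map f).sum)).sum := by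
  intro L
  induction L with
  | nil => simp
  | cons x xs ih => simp [List.flatMap_cons, ih]

theorem poisk_sum (N : Int) : poisk N =
    ((PySem.List.pyRange 0 10 1).map (fun i =>
      ((PySem.List.pyRange 0 10 1).map (fun k =>
        ((PySem.List.pyRange 0 10 1).map (gA N i k)).sum)).sum)).sum := by
  unfold poisk
  rw [foldl_shift _ _ (fun a i => by
    rw [foldl_shift (fun k => ((PySem.List.pyRange 0 10 1).map (gA N i k)).sum) _ (fun a k => by
      rw [foldl_shift (gA N i k) _ (fun a s => by
        simp only [gA]; split_ifs <;> ring)])])]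
  ring

theorem poisk_alt_sum (N : Int) : poisk_alt N =
    ((PySem.List.pyRange 100 1000 1).map (gB N)).sum := by
  unfold poisk_alt
  rw [foldl_shift (gB N) _ (fun a z => by simp only [gB]; split_ifs <;> ring)]
  ring

theorem gA_eq (N i k s : Int) : gA N i k s =
    if (s ≠ k ∧ k ≠ i ∧ s ≠ i) ∧ s * 100 + k * 10 + i ≥ 100 then indLt N (s * 100 + k * 10 + i)
    else 0 := by
  unfold gA indLt
  split_ifs <;> tauto

theorem gB_eq (N z : Int) : gB N z =
    if PySem.Int.floordiv z 100 ≠ PySem.Int.mod (PySem.Int.floordiv z 10) 10 ∧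
       PySem.Int.mod (PySem.Int.floordiv z 10) 10 ≠ PySem.Int.mod z 10 ∧
       PySem.Int.floordiv z 100 ≠ PySem.Int.mod z 10 then indLt N z
    else 0 := by
  unfold gB indLt
  split_ifs <;> tauto

theorem poisk_LA (N : Int) : poisk N = (LA.map (indLt N)).sum := by
  rw [poisk_sum]
  unfold LA
  rw [sum_map_flatMap]
  refine congrArg List.sum (List.map_congr_left (fun i _ => ?_))
  rw [sum_map_flatMap]
  refine congrArg List.sum (List.map_congr_left (fun k _ => ?_))
  rw [List.map_map]
  simp only [Function.comp_def]
  rw [← sum_map_ite_filter (fun s => (s ≠ k ∧ k ≠ i ∧ s ≠ i) ∧ s * 100 + k * 10 + i ≥ 100)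
        (fun s => indLt N (s * 100 + k * 10 + i))]
  refine congrArg List.sum (List.map_congr_left (fun s _ => ?_))
  exact gA_eq N i k s

theorem poisk_alt_LB (N : Int) : poisk_alt N = (LB.map (indLt N)).sum := by
  rw [poisk_alt_sum]
  unfold LB
  rw [← sum_map_ite_filter (fun z =>
        PySem.Int.floordiv z 100 ≠ PySem.Int.mod (PySem.Int.floordiv z 10) 10 ∧
        PySem.Int.mod (PySem.Int.floordiv z 10) 10 ≠ PySem.Int.mod z 10 ∧
        PySem.Int.floordiv z 100 ≠ PySem.Int.mod z 10) (indLt N)]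
  refine congrArg List.sum (List.map_congr_left (fun z _ => ?_))
  exact gB_eq N z

set_option maxRecDepth 100000 in
set_option maxHeartbeats 1000000 in
theorem LA_perm_LB : LA.Perm LB := by decide

-- ===== VERDICT (by name: the statement is the Claim_ definition above) =====
theorem poisk_spec : Claim_equal_poisk := by
  intro N _
  unfold Spec_poisk
  rw [poisk_LA, poisk_alt_LB]
  exact (LA_perm_LB.map (indLt N)).sum_eq
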